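-- pv_equiv track=rewrite | github.com/Satyasiddardha/PQC_migration | backend/engines/migration_advisor.py | generate_approach_recommendation
-- ===== SOURCE A (Python) =====
-- def generate_approach_recommendation(items: list) -> dict:
--     """Generate overall migration approach recommendation."""
--     critical = sum(1 for i in items if i["severity"] == "CRITICAL")
--     high = sum(1 for i in items if i["severity"] == "HIGH")
--
--     if critical > 0:
--         phase = "IMMEDIATE"
--         approach = "Start with critical findings (MD5, DES, SHA-1). These are broken even classically."
--     elif high > 0:
--         phase = "SHORT-TERM"
--         approach = "Plan hybrid migration for RSA/ECC within 12-24 months. Quantum computers capable of breaking these are expected by 2030-2035."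
--     else:
--         phase = "LONG-TERM"
--         approach = "Current cryptography is adequate but should be tracked. Plan for PQC migration as standards mature."
--
--     return {
--         "phase": phase,
--         "approach": approach,
--         "recommended_strategy": "Crypto-Agility — design systems to easily swap algorithms without major refactoring",
--         "standards_reference": "Follow NIST SP 800-208 and CNSA 2.0 timeline recommendations",
--     }
-- ===== SOURCE B (Python) =====
-- _TABLE = {
--     2: ("IMMEDIATE", "Start with critical findings (MD5, DES, SHA-1). These are broken even classically."),
--     1: ("SHORT-TERM", "Plan hybrid migration for RSA/ECC within 12-24 months. Quantum computers capable of breaking these are expected by 2030-2035."),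
--     0: ("LONG-TERM", "Current cryptography is adequate but should be tracked. Plan for PQC migration as standards mature."),
-- }
-- _RANK = {"CRITICAL": 2, "HIGH": 1}
--
-- def generate_approach_recommendation(items: list) -> dict:
--     """Generate overall migration approach recommendation."""
--     max_priority = 0
--     for i in items:
--         max_priority = max(max_priority, _RANK.get(i["severity"], 0))
--     phase, approach = _TABLE[max_priority]
--     return {
--         "phase": phase,
--         "approach": approach,
--         "recommended_strategy": "Crypto-Agility — design systems to easily swap algorithms without major refactoring",
--         "standards_reference": "Follow NIST SP 800-208 and CNSA 2.0 timeline recommendations",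
--     }
-- ===== Notes on version B (the rewrite author's own statement) =====
-- stated objective: simpler
-- what changed: Replaces the two counting passes and the if/elif chain by a single fold computing the maximum severity rank plus a table lookup keyed by that rank.
import Mathlib
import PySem

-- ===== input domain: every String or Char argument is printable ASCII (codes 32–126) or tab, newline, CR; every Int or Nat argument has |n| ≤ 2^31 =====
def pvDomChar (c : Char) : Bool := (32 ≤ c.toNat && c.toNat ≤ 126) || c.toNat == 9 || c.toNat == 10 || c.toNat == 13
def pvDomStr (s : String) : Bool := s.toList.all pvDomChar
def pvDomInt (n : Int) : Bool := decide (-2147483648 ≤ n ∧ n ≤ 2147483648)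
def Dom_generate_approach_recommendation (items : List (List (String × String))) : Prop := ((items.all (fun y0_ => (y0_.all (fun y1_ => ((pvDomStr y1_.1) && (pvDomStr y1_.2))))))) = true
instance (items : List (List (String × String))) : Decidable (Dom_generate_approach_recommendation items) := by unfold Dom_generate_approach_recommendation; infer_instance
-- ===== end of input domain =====

-- B replaces A's two counting passes and if/elif chain by one max-rank fold and a table lookup (objective: simpler).

-- ===== PORT A =====
-- i["severity"]: first-match lookup; Pre_ guarantees the key exists, so getD "" is exact there
def pvSev (d : List (String × String)) : String :=
  ((PySem.Dict.mk d).get? "severity").getD ""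

def generate_approach_recommendation (items : List (List (String × String))) : List (String × String) :=
  let critical : Int := (items.countP (fun i => pvSev i == "CRITICAL") : Int)
  let high : Int := (items.countP (fun i => pvSev i == "HIGH") : Int)
  let pa : String × String :=
    if critical > 0 then
      ("IMMEDIATE", "Start with critical findings (MD5, DES, SHA-1). These are broken even classically.")
    else if high > 0 then
      ("SHORT-TERM", "Plan hybrid migration for RSA/ECC within 12-24 months. Quantum computers capable of breaking these are expected by 2030-2035.")
    else
      ("LONG-TERM", "Current cryptography is adequate but should be tracked. Plan for PQC migration as standards mature.")
  [("phase", pa.1), ("approach", pa.2),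
   ("recommended_strategy", "Crypto-Agility — design systems to easily swap algorithms without major refactoring"),
   ("standards_reference", "Follow NIST SP 800-208 and CNSA 2.0 timeline recommendations")]

-- ===== PORT B =====
def pvRank (s : String) : Nat :=
  if s == "CRITICAL" then 2 else if s == "HIGH" then 1 else 0

def pvTable (p : Nat) : String × String :=
  if p == 2 then
    ("IMMEDIATE", "Start with critical findings (MD5, DES, SHA-1). These are broken even classically.")
  else if p == 1 then
    ("SHORT-TERM", "Plan hybrid migration for RSA/ECC within 12-24 months. Quantum computers capable of breaking these are expected by 2030-2035.")
  else
    ("LONG-TERM", "Current cryptography is adequate but should be tracked. Plan for PQC migration as standards mature.")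

def generate_approach_recommendation_alt (items : List (List (String × String))) : List (String × String) :=
  let maxp : Nat := items.foldl (fun m i => max m (pvRank (pvSev i))) 0
  let pa := pvTable maxp
  [("phase", pa.1), ("approach", pa.2),
   ("recommended_strategy", "Crypto-Agility — design systems to easily swap algorithms without major refactoring"),
   ("standards_reference", "Follow NIST SP 800-208 and CNSA 2.0 timeline recommendations")]

-- ===== PRECONDITION & SPEC =====
-- Pre_ excludes exactly the inputs where some item lacks a "severity" key: there both A and B raise KeyError.
def Pre_generate_approach_recommendation (items : List (List (String × String))) : Prop :=
  ∀ d ∈ items, ((PySem.Dict.mk d).get? "severity").isSome = true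
instance (items : List (List (String × String))) : Decidable (Pre_generate_approach_recommendation items) := by unfold Pre_generate_approach_recommendation; infer_instance
def pvWitness_generate_approach_recommendation : (List (List (String × String))) := [[("severity", "HIGH")], [("severity", "LOW")]]

def Spec_generate_approach_recommendation (items : List (List (String × String))) (out : List (String × String)) : Prop := out = generate_approach_recommendation_alt items
instance (items : List (List (String × String))) (out : List (String × String)) : Decidable (Spec_generate_approach_recommendation items out) := by unfold Spec_generate_approach_recommendation; infer_instance

-- ===== CLAIM (what is proved, stated in full; the proofs are below) =====
def Claim_equal_generate_approach_recommendation : Prop := ∀ (items : List (List (String × String))), Dom_generate_approach_recommendation items → Pre_generate_approach_recommendation items → Spec_generate_approach_recommendation items (generate_approach_recommendation items)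

-- ===== LEMMAS AND PROOFS =====
def pvMaxp (items : List (List (String × String))) : Nat :=
  items.foldl (fun m i => max m (pvRank (pvSev i))) 0

theorem pvMaxp_foldl (l : List (List (String × String))) (a : Nat) :
    l.foldl (fun m i => max m (pvRank (pvSev i))) a = max a (pvMaxp l) := by
  induction l generalizing a with
  | nil => simp only [List.foldl_nil, pvMaxp]; omega
  | cons d t ih =>
      have h2 : pvMaxp (d :: t) = max (pvRank (pvSev d)) (pvMaxp t) := by
        show List.foldl _ _ (d :: t) = _
        rw [List.foldl_cons, ih]; omega
      rw [List.foldl_cons, ih, h2]; omega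

theorem pvMaxp_char (l : List (List (String × String))) :
    pvMaxp l = if l.countP (fun i => pvSev i == "CRITICAL") > 0 then 2
               else if l.countP (fun i => pvSev i == "HIGH") > 0 then 1 else 0 := by
  induction l with
  | nil => simp [pvMaxp]
  | cons d t ih =>
      have h : pvMaxp (d :: t) = max (pvRank (pvSev d)) (pvMaxp t) := by
        simp only [pvMaxp, List.foldl_cons, Nat.zero_max]
        exact pvMaxp_foldl t _
      rw [h, ih]
      simp only [List.countP_cons, pvRank]
      by_cases hc : pvSev d == "CRITICAL" <;> by_cases hh : pvSev d == "HIGH" <;>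
        simp [hc, hh] <;> split_ifs <;> omega

theorem generate_approach_recommendation_eq (items : List (List (String × String))) :
    generate_approach_recommendation items = generate_approach_recommendation_alt items := by
  unfold generate_approach_recommendation generate_approach_recommendation_alt
  show _ = (fun pa => [("phase", pa.1), ("approach", pa.2),
      ("recommended_strategy", "Crypto-Agility — design systems to easily swap algorithms without major refactoring"),
      ("standards_reference", "Follow NIST SP 800-208 and CNSA 2.0 timeline recommendations")])
    (pvTable (pvMaxp items))
  rw [pvMaxp_char]
  by_cases hc : items.countP (fun i => pvSev i == "CRITICAL") > 0 <;>
    by_cases hh : items.countP (fun i => pvSev i == "HIGH") > 0 <;>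
      simp [pvTable, hc, hh, Int.natCast_pos]

-- ===== VERDICT (by name: the statement is the Claim_ definition above) =====
theorem generate_approach_recommendation_spec : Claim_equal_generate_approach_recommendation := by
  intro items _ _
  exact generate_approach_recommendation_eq items
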